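-- pv_equiv track=rewrite | github.com/Omar-Assem1/Control-Project | signal-flow-graph-backend/services/loop_finder.py | _are_non_touching
-- ===== SOURCE A (Python) =====
-- from typing import Any
--
-- def _are_non_touching(combo: tuple[int, ...], loops: list[dict]) -> bool:
--     """Return True iff all loops in *combo* share no node with each other."""
--     # Build union of node sets one by one; any intersection → touching
--     seen: set[Any] = set()
--     for idx in combo:
--         loop_nodes = set(loops[idx]["nodes"])
--         if loop_nodes & seen:
--             return False
--         seen |= loop_nodes
--     return True
-- ===== SOURCE B (Python) =====
-- def _are_non_touching(combo: tuple[int, ...], loops: list[dict]) -> bool: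
--     """Return True iff all loops in *combo* share no node with each other."""
--     # Stage 1: materialise every loop's node set up front.
--     node_sets = [set(loops[idx]["nodes"]) for idx in combo]
--
--     # Stage 2: recursively check the head set against every later set, then the tail.
--     def _pairwise_disjoint(sets):
--         if not sets:
--             return True
--         head, rest = sets[0], sets[1:]
--         return all(head.isdisjoint(t) for t in rest) and _pairwise_disjoint(rest)
--
--     return _pairwise_disjoint(node_sets)
-- ===== Notes on version B (the rewrite author's own statement) =====
-- stated objective: alternative
-- what changed: B drops A's single pass with a running union and incremental intersection test; it first materialises all node sets, then decides by a recursive all-pairs isdisjoint check (head against every later set, then the tail), maintaining no accumulator at all.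
-- outside the precondition, e.g. on _are_non_touching((0, 0, 2), [{'nodes': [1]}]): A returns False, B raises IndexError
import Mathlib
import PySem

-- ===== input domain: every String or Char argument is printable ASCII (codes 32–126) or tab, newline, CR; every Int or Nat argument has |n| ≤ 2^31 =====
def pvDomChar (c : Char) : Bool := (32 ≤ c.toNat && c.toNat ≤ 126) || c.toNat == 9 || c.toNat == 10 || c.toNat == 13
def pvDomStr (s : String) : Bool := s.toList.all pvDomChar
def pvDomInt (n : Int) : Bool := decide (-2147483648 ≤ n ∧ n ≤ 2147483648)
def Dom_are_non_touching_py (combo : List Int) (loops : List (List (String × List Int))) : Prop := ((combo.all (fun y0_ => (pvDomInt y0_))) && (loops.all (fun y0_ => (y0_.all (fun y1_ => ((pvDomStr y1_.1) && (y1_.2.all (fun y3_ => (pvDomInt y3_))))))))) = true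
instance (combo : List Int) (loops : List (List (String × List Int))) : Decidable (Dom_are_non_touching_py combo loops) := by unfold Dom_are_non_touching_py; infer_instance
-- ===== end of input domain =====

-- B replaces A's single pass with a running union by a staged algorithm: build all node
-- sets first, then a recursive all-pairs isdisjoint check with no accumulator.

-- ===== PORT A =====
def aLoop (loops : List (List (String × List Int))) : PySem.Set Int → List Int → Bool
  | _, [] => true
  | seen, idx :: rest =>
    match PySem.List.pyGet? loops idx with
    | none => false          -- Python raises IndexError here (excluded by Pre_)
    | some d =>
      match (PySem.Dict.mk d).get? "nodes" with
      | none => false        -- Python raises KeyError here (excluded by Pre_)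
      | some ns =>
        let loop_nodes : PySem.Set Int := PySem.Set.ofList ns
        if PySem.Set.inter loop_nodes seen ≠ ([] : List Int) then false
        else aLoop loops (PySem.Set.union seen loop_nodes) rest

def are_non_touching_py (combo : List Int) (loops : List (List (String × List Int))) : Bool :=
  aLoop loops PySem.Set.empty combo

-- ===== PORT B =====
-- the node set of loop idx (the comprehension element; getD [] is total — Pre_ excludes bad indices)
def nodeSet (loops : List (List (String × List Int))) (idx : Int) : PySem.Set Int :=
  PySem.Set.ofList
    (((PySem.List.pyGet? loops idx).bind (fun d => (PySem.Dict.mk d).get? "nodes")).getD [])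

-- _pairwise_disjoint: head against every later set, then recurse on the tail
def pairwiseDisjoint : List (PySem.Set Int) → Bool
  | [] => true
  | head :: rest => rest.all (fun t => PySem.Set.isdisjoint head t) && pairwiseDisjoint rest

def are_non_touching_py_alt (combo : List Int) (loops : List (List (String × List Int))) : Bool :=
  pairwiseDisjoint (combo.map (nodeSet loops))

-- ===== PRECONDITION & SPEC =====
-- Pre_ restricts to the natural domain: every index in combo names an existing loop dict
-- that has a "nodes" key. Outside it A raises — except when an earlier pair already touches,
-- where A's early exit returns False before reaching the bad index; that accidental value is
-- excluded too (B, building all sets up front, raises there).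
def Pre_are_non_touching_py (combo : List Int) (loops : List (List (String × List Int))) : Prop :=
  ∀ idx ∈ combo, (((PySem.List.pyGet? loops idx).bind (fun d => (PySem.Dict.mk d).get? "nodes")).isSome = true)
instance (combo : List Int) (loops : List (List (String × List Int))) : Decidable (Pre_are_non_touching_py combo loops) := by unfold Pre_are_non_touching_py; infer_instance

def pvWitness_are_non_touching_py : List Int × (List (List (String × List Int))) :=
  ([0, 1], [[("nodes", [1, 2])], [("nodes", [3])]])

def Spec_are_non_touching_py (combo : List Int) (loops : List (List (String × List Int))) (out : Bool) : Prop := out = are_non_touching_py_alt combo loops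
instance (combo : List Int) (loops : List (List (String × List Int))) (out : Bool) : Decidable (Spec_are_non_touching_py combo loops out) := by unfold Spec_are_non_touching_py; infer_instance

-- ===== CLAIM =====
def Claim_equal_are_non_touching_py : Prop := ∀ (combo : List Int) (loops : List (List (String × List Int))), Dom_are_non_touching_py combo loops → Pre_are_non_touching_py combo loops → Spec_are_non_touching_py combo loops (are_non_touching_py combo loops)

-- ===== LEMMAS AND PROOFS =====

-- A's touch test (inter = []) is B's isdisjoint.
lemma inter_eq_nil_iff (s t : PySem.Set Int) :
    PySem.Set.inter s t = ([] : List Int) ↔ PySem.Set.isdisjoint s t = true := by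
  rw [PySem.Set.isdisjoint_iff]
  unfold PySem.Set.inter
  constructor
  · intro h x hx hxt
    have hmem : x ∈ List.filter (fun y => PySem.Set.contains t y) s :=
      List.mem_filter.mpr ⟨hx, (PySem.Set.contains_iff t x).mpr hxt⟩
    rw [h] at hmem
    exact absurd hmem (List.not_mem_nil)
  · intro h
    rw [List.filter_eq_nil_iff]
    intro x hx
    simp only [Bool.not_eq_true]
    cases hc : PySem.Set.contains t x with
    | false => rfl
    | true => exact absurd ((PySem.Set.contains_iff t x).mp hc) (h x hx)

lemma isdisjoint_union (a s t : PySem.Set Int) :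
    PySem.Set.isdisjoint a (PySem.Set.union s t)
      = (PySem.Set.isdisjoint a s && PySem.Set.isdisjoint a t) := by
  by_cases h : ∀ x ∈ a, x ∉ PySem.Set.union s t
  · have h1 : PySem.Set.isdisjoint a (PySem.Set.union s t) = true := (PySem.Set.isdisjoint_iff _ _).mpr h
    have hs : PySem.Set.isdisjoint a s = true := (PySem.Set.isdisjoint_iff _ _).mpr
      (fun x hx hxs => h x hx ((PySem.Set.mem_union _ _ _).mpr (Or.inl hxs)))
    have ht : PySem.Set.isdisjoint a t = true := (PySem.Set.isdisjoint_iff _ _).mpr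
      (fun x hx hxt => h x hx ((PySem.Set.mem_union _ _ _).mpr (Or.inr hxt)))
    simp [h1, hs, ht]
  · push Not at h
    obtain ⟨x, hxa, hxu⟩ := h
    have h1 : PySem.Set.isdisjoint a (PySem.Set.union s t) = false := by
      cases hc : PySem.Set.isdisjoint a (PySem.Set.union s t) with
      | false => rfl
      | true => exact absurd hxu ((PySem.Set.isdisjoint_iff _ _).mp hc x hxa)
    rcases (PySem.Set.mem_union _ _ _).mp hxu with hxs | hxt
    · have hs : PySem.Set.isdisjoint a s = false := by
        cases hc : PySem.Set.isdisjoint a s with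
        | false => rfl
        | true => exact absurd hxs ((PySem.Set.isdisjoint_iff _ _).mp hc x hxa)
      simp [h1, hs]
    · have ht : PySem.Set.isdisjoint a t = false := by
        cases hc : PySem.Set.isdisjoint a t with
        | false => rfl
        | true => exact absurd hxt ((PySem.Set.isdisjoint_iff _ _).mp hc x hxa)
      simp [h1, ht]

lemma isdisjoint_comm (s t : PySem.Set Int) :
    PySem.Set.isdisjoint s t = PySem.Set.isdisjoint t s := by
  by_cases h : ∀ x ∈ s, x ∉ t
  · have h1 := (PySem.Set.isdisjoint_iff s t).mpr h
    have h2 := (PySem.Set.isdisjoint_iff t s).mpr (fun x hx hxs => h x hxs hx)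
    rw [h1, h2]
  · push Not at h
    obtain ⟨x, hxs, hxt⟩ := h
    have h1 : PySem.Set.isdisjoint s t = false := by
      cases hc : PySem.Set.isdisjoint s t with
      | false => rfl
      | true => exact absurd hxt ((PySem.Set.isdisjoint_iff _ _).mp hc x hxs)
    have h2 : PySem.Set.isdisjoint t s = false := by
      cases hc : PySem.Set.isdisjoint t s with
      | false => rfl
      | true => exact absurd hxs ((PySem.Set.isdisjoint_iff _ _).mp hc x hxt)
    rw [h1, h2]

lemma isdisjoint_empty (s : PySem.Set Int) :
    PySem.Set.isdisjoint s PySem.Set.empty = true :=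
  (PySem.Set.isdisjoint_iff _ _).mpr (fun _ _ hx => by simp [PySem.Set.empty] at hx)

lemma all_and_bool (l : List Int) (f g : Int → Bool) :
    (l.all fun i => f i && g i) = (l.all f && l.all g) := by
  induction l with
  | nil => simp
  | cons a l ih => simp only [List.all_cons, ih]; ac_rfl

-- A's loop, generalized over the running union, in terms of B's pairwise check.
lemma aLoop_eq (loops : List (List (String × List Int))) (combo : List Int) :
    ∀ seen : PySem.Set Int,
    (∀ idx ∈ combo, (((PySem.List.pyGet? loops idx).bind (fun d => (PySem.Dict.mk d).get? "nodes")).isSome = true)) →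
    aLoop loops seen combo =
      (combo.all (fun i => PySem.Set.isdisjoint (nodeSet loops i) seen)
        && pairwiseDisjoint (combo.map (nodeSet loops))) := by
  induction combo with
  | nil => intro seen _; simp [aLoop, pairwiseDisjoint]
  | cons idx rest ih =>
    intro seen hpre
    have hidx := hpre idx (List.mem_cons_self)
    cases hget : PySem.List.pyGet? loops idx with
    | none => simp [hget] at hidx
    | some d =>
    cases hnodes : (PySem.Dict.mk d).get? "nodes" with
    | none => simp [hget, hnodes] at hidx
    | some ns =>
    have hnf : nodeSet loops idx = PySem.Set.ofList ns := by simp [nodeSet, hget, hnodes]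
    by_cases hint : PySem.Set.inter (PySem.Set.ofList ns) seen = ([] : List Int)
    · -- head disjoint from seen: recurse with the enlarged union
      have hdis : PySem.Set.isdisjoint (nodeSet loops idx) seen = true := by
        rw [hnf]; exact (inter_eq_nil_iff _ _).mp hint
      have hrec := ih (PySem.Set.union seen (PySem.Set.ofList ns))
        (fun i hi => hpre i (List.mem_cons_of_mem _ hi))
      simp only [aLoop, hget, hnodes, hint, ne_eq, not_true_eq_false, if_false]
      rw [hrec]
      simp only [List.map_cons, pairwiseDisjoint, List.all_cons, hdis, Bool.true_and]
      have hsplit : ∀ i, PySem.Set.isdisjoint (nodeSet loops i) (PySem.Set.union seen (PySem.Set.ofList ns))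
          = (PySem.Set.isdisjoint (nodeSet loops i) seen
             && PySem.Set.isdisjoint (nodeSet loops idx) (nodeSet loops i)) := by
        intro i
        rw [isdisjoint_union, ← hnf, isdisjoint_comm (nodeSet loops i) (nodeSet loops idx)]
      rw [List.all_congr rfl (fun i => hsplit i), all_and_bool, List.all_map]
      simp only [Function.comp_def]
      ac_rfl
    · -- head touches seen: A returns False, and the head's all-test fails too
      have hdis : PySem.Set.isdisjoint (nodeSet loops idx) seen = false := by
        rw [hnf]
        cases hc : PySem.Set.isdisjoint (PySem.Set.ofList ns) seen with
        | false => rfl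
        | true => exact absurd ((inter_eq_nil_iff _ _).mpr hc) hint
      simp [aLoop, hget, hnodes, hint, hdis]

-- ===== VERDICT =====
theorem are_non_touching_py_spec : Claim_equal_are_non_touching_py := by
  intro combo loops _ hpre
  unfold Spec_are_non_touching_py are_non_touching_py are_non_touching_py_alt
  rw [aLoop_eq loops combo PySem.Set.empty hpre]
  have : combo.all (fun i => PySem.Set.isdisjoint (nodeSet loops i) PySem.Set.empty) = true := by
    rw [List.all_eq_true]; intro i _; exact isdisjoint_empty _
  rw [this, Bool.true_and]
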